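-- pv_equiv track=rewrite | github.com/eno-lang/enolib | python/tests/patterns/util.py | spacing_variants
-- ===== SOURCE A (Python) =====
-- def spacing_variants(tokens):
--   if len(tokens) > 1:
--     results = []
--
--     for variant in spacing_variants(tokens[1:]):
--       results.append(f"{tokens[0]}{variant}")
--       results.append(f"   {tokens[0]}{variant}")
--
--     return results
--   else:
--     return [tokens[0], f"   {tokens[0]}"]
-- ===== SOURCE B (Python) =====
-- def spacing_variants(tokens):
--     # Bit-counter enumeration: bit j of k (LSB = token 0) decides whether
--     # token j gets the three-space prefix; k runs 0 .. 2**n - 1.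
--     return [
--         ''.join(('   ' if (k >> j) & 1 else '') + tok
--                 for j, tok in enumerate(tokens))
--         for k in range(1 << len(tokens))
--     ]
-- ===== Notes on version B (the rewrite author's own statement) =====
-- stated objective: alternative
-- what changed: Replaced A's recursion over the tail (doubling the recursive result level by level) with a flat iterative enumeration of a binary counter k in range(2**n), where bit j of k decides whether token j gets the three-space prefix.
import Mathlib
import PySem

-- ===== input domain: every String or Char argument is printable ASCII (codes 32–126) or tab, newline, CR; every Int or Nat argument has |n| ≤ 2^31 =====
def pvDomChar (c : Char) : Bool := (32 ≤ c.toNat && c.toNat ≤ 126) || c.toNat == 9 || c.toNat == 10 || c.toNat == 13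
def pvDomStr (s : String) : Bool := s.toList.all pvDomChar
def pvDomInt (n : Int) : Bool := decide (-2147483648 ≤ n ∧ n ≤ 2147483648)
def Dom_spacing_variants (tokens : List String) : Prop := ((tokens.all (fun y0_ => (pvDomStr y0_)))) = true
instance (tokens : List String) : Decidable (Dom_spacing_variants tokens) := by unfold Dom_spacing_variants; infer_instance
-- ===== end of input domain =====

-- B replaces A's tail recursion by a flat binary-counter enumeration (bit j of k
-- chooses token j's three-space prefix); same cost, different decomposition.
-- Python string concatenation (f-strings / '+') is ported as PySem.Str.join "" [...] (exact).

-- ===== PORT A =====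
def spacing_variants (tokens : List String) : List String :=
  match tokens with
  | [] => []   -- Python A raises IndexError here (tokens[0]); excluded by Pre_
  | [t] => [t, PySem.Str.join "" ["   ", t]]
  | t :: rest =>
      (spacing_variants rest).foldl
        (fun results variant =>
          (results ++ [PySem.Str.join "" [t, variant]])
            ++ [PySem.Str.join "" ["   ", t, variant]])
        []

-- ===== PORT B =====
def spacing_variants_alt (tokens : List String) : List String :=
  (List.range (2 ^ tokens.length)).map (fun k =>
    PySem.Str.join ""
      ((PySem.List.enumerate tokens).map (fun jt =>
        PySem.Str.join "" [if k.testBit jt.1.toNat then "   " else "", jt.2])))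

-- ===== PRECONDITION & SPEC =====
-- Pre_ excludes only the empty list, on which Python A raises IndexError.
def Pre_spacing_variants (tokens : List String) : Prop := tokens ≠ []
instance (tokens : List String) : Decidable (Pre_spacing_variants tokens) := by unfold Pre_spacing_variants; infer_instance
def pvWitness_spacing_variants : List String := ["a", "b"]

def Spec_spacing_variants (tokens : List String) (out : List String) : Prop := out = spacing_variants_alt tokens
instance (tokens : List String) (out : List String) : Decidable (Spec_spacing_variants tokens out) := by unfold Spec_spacing_variants; infer_instance

-- ===== CLAIM (what is proved, stated in full; the proofs are below) =====
def Claim_equal_spacing_variants : Prop := ∀ (tokens : List String), Dom_spacing_variants tokens → Pre_spacing_variants tokens → Spec_spacing_variants tokens (spacing_variants tokens)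

-- ===== LEMMAS AND PROOFS =====

-- character-level spelling of one variant: bit 0 of k prefixes the head token
def variantCs (k : Nat) : List String → List Char
  | [] => []
  | t :: rest => (if k.testBit 0 then [' ', ' ', ' '] else []) ++ t.toList ++ variantCs (k / 2) rest

theorem chars_join_empty (l : List (List Char)) : PySem.Chars.join [] l = l.flatten := by
  induction l with
  | nil => simp [PySem.Chars.join_nil]
  | cons p rest ih =>
    cases rest with
    | nil => simp [PySem.Chars.join_singleton]
    | cons q rs =>
      rw [PySem.Chars.join_cons_cons]
      simp only [List.flatten_cons] at ih ⊢
      simp [ih]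

theorem spaces_toList : ("   " : String).toList = [' ', ' ', ' '] := rfl

theorem empty_toList : ("" : String).toList = [] := rfl

theorem join_empty_toList (l : List String) :
    (PySem.Str.join "" l).toList = (l.map String.toList).flatten := by
  rw [PySem.Str.toList_join, empty_toList, chars_join_empty]

theorem join_empty_cons (p : String) (l : List String) :
    (PySem.Str.join "" (p :: l)).toList = p.toList ++ (PySem.Str.join "" l).toList := by
  rw [join_empty_toList, join_empty_toList, List.map_cons, List.flatten_cons]

theorem alt_char (tokens : List String) : ∀ (k s : Nat),
    (PySem.Str.join ""
      ((PySem.List.enumerate tokens (s : Int)).map (fun jt =>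
        PySem.Str.join "" [if k.testBit jt.1.toNat then "   " else "", jt.2]))).toList
      = variantCs (k >>> s) tokens := by
  induction tokens with
  | nil =>
    intro k s
    simp [PySem.List.enumerate_nil, variantCs]
  | cons t rest ih =>
    intro k s
    have hc : ((s : Int) + 1) = ((s + 1 : Nat) : Int) := by push_cast; ring
    rw [PySem.List.enumerate_cons, List.map_cons, join_empty_cons, hc, ih k (s + 1)]
    have hh : ((fun jt : Int × String =>
          PySem.Str.join "" [if k.testBit jt.1.toNat then "   " else "", jt.2])
            ((s : Int), t)).toList
        = (if k.testBit s then [' ', ' ', ' '] else []) ++ t.toList := by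
      show (PySem.Str.join "" [if k.testBit ((s : Int)).toNat then "   " else "", t]).toList = _
      rw [join_empty_cons, join_empty_cons, join_empty_toList]
      rw [apply_ite String.toList]
      simp [spaces_toList, Int.toNat_natCast]
    rw [hh]
    have hb : (k >>> s).testBit 0 = k.testBit s := by
      rw [Nat.testBit_shiftRight, Nat.add_zero]
    have hsr : (k >>> s) / 2 = k >>> (s + 1) := (Nat.shiftRight_succ k s).symm
    have hrfl : variantCs (k >>> s) (t :: rest)
        = (if (k >>> s).testBit 0 then [' ', ' ', ' '] else []) ++ t.toList
            ++ variantCs ((k >>> s) / 2) rest := rfl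
    rw [hrfl, hb, hsr]

theorem alt_eq (tokens : List String) :
    (spacing_variants_alt tokens).map String.toList
      = (List.range (2 ^ tokens.length)).map (fun k => variantCs k tokens) := by
  unfold spacing_variants_alt
  rw [List.map_map]
  apply List.map_congr_left
  intro k _
  have h := alt_char tokens k 0
  simpa [Nat.shiftRight_zero] using h

theorem range_double {α : Type} (m : Nat) (f : Nat → α) :
    (List.range (2 * m)).map f
      = (List.range m).flatMap (fun v => [f (2 * v), f (2 * v + 1)]) := by
  induction m with
  | zero => simp
  | succ m ih =>
    have h : 2 * (m + 1) = (2 * m + 1) + 1 := by ring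
    rw [h, List.range_succ, List.range_succ, List.range_succ]
    simp [List.flatMap_append, ih]

theorem a_flatMap (t q : String) (rs : List String) :
    spacing_variants (t :: q :: rs)
      = (spacing_variants (q :: rs)).flatMap
          (fun v => [PySem.Str.join "" [t, v], PySem.Str.join "" ["   ", t, v]]) := by
  show (spacing_variants (q :: rs)).foldl
      (fun results variant =>
        (results ++ [PySem.Str.join "" [t, variant]])
          ++ [PySem.Str.join "" ["   ", t, variant]]) []
    = _
  have hfun : (fun (results : List String) (variant : String) =>
        (results ++ [PySem.Str.join "" [t, variant]])
          ++ [PySem.Str.join "" ["   ", t, variant]])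
      = (fun results variant =>
          results ++ [PySem.Str.join "" [t, variant], PySem.Str.join "" ["   ", t, variant]]) := by
    funext results variant
    simp
  rw [hfun, PySem.List.foldl_append_eq_flatMap]
  simp

theorem a_eq (tokens : List String) (h : tokens ≠ []) :
    (spacing_variants tokens).map String.toList
      = (List.range (2 ^ tokens.length)).map (fun k => variantCs k tokens) := by
  induction tokens with
  | nil => exact absurd rfl h
  | cons t rest ih =>
    cases rest with
    | nil =>
      have hr : List.range (2 ^ ([t] : List String).length) = [0, 1] := rfl
      rw [hr]
      show [t, PySem.Str.join "" ["   ", t]].map String.toList = _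
      simp [variantCs, chars_join_empty, spaces_toList]
    | cons q rs =>
      rw [a_flatMap t q rs, List.map_flatMap]
      have hlen : ((t :: q :: rs : List String)).length = (q :: rs : List String).length + 1 := rfl
      rw [hlen, pow_succ, mul_comm, range_double]
      have hv : ∀ v : String,
          List.map String.toList [PySem.Str.join "" [t, v], PySem.Str.join "" ["   ", t, v]]
            = [t.toList ++ v.toList, [' ', ' ', ' '] ++ (t.toList ++ v.toList)] := by
        intro v
        simp [chars_join_empty, spaces_toList]
      simp only [hv]
      have hmap := ih (by simp)
      have hstep : (spacing_variants (q :: rs)).flatMap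
            (fun v => [t.toList ++ v.toList, [' ', ' ', ' '] ++ (t.toList ++ v.toList)])
          = ((spacing_variants (q :: rs)).map String.toList).flatMap
              (fun cs => [t.toList ++ cs, [' ', ' ', ' '] ++ (t.toList ++ cs)]) := by
        rw [List.flatMap_map]
      rw [hstep, hmap, List.flatMap_map]
      have hb0 : ∀ v : Nat, Nat.testBit (2 * v) 0 = false := by intro v; simp
      have hb1 : ∀ v : Nat, Nat.testBit (2 * v + 1) 0 = true := by intro v; simp
      have hd0 : ∀ v : Nat, 2 * v / 2 = v := by intro v; omega
      have hd1 : ∀ v : Nat, (2 * v + 1) / 2 = v := by intro v; omega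
      simp only [variantCs, hb0, hb1, hd0, hd1, if_true, if_false,
        Bool.false_eq_true, List.append_assoc]
      simp

-- ===== VERDICT (by name: the statement is the Claim_ definition above) =====
theorem spacing_variants_spec : Claim_equal_spacing_variants := by
  intro tokens _ hpre
  unfold Spec_spacing_variants
  have h := (a_eq tokens hpre).trans (alt_eq tokens).symm
  exact (List.map_injective_iff.mpr (fun a b hab => String.toList_inj.mp hab)) h
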